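-- pv_equiv track=rewrite | github.com/conchoecia/egt | src/egt/umap_taxonomy_clusters.py | _deepest_common_informative_name
-- ===== SOURCE A (Python) =====
-- BASE_GENERIC_LABELS = {
--     "root",
--     "cellular organisms",
--     "Eukaryota",
--     "Opisthokonta",
--     "Metazoa",
--     "Eumetazoa",
--     "Bilateria",
--     "Protostomia",
--     "Deuterostomia",
-- }
--
-- def _deepest_common_informative_name(
--     path_a: list[str | None],
--     path_b: list[str | None],
--     generic_labels: set[str] | None = None,
-- ) -> tuple[str | None, int]:
--     labels_to_skip = generic_labels or BASE_GENERIC_LABELS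
--     common_label: str | None = None
--     common_depth = -1
--     for depth, (name_a, name_b) in enumerate(zip(path_a, path_b)):
--         if name_a != name_b:
--             break
--         if name_a and name_a not in labels_to_skip:
--             common_label = name_a
--             common_depth = depth
--     return common_label, common_depth
-- ===== SOURCE B (Python) =====
-- BASE_GENERIC_LABELS = {
--     "root",
--     "cellular organisms",
--     "Eukaryota",
--     "Opisthokonta",
--     "Metazoa",
--     "Eumetazoa",
--     "Bilateria",
--     "Protostomia",
--     "Deuterostomia",
-- }
--
-- def _deepest_common_informative_name(path_a, path_b, generic_labels=None):
--     labels_to_skip = generic_labels or BASE_GENERIC_LABELS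
--     # common-prefix length under zip's stop-at-shorter semantics
--     k = 0
--     n = min(len(path_a), len(path_b))
--     while k < n and path_a[k] == path_b[k]:
--         k += 1
--     # deepest informative name in the shared prefix, searched from the back
--     for depth in range(k - 1, -1, -1):
--         name = path_a[depth]
--         if name and name not in labels_to_skip:
--             return name, depth
--     return None, -1
-- ===== Notes on version B (the rewrite author's own statement) =====
-- stated objective: alternative
-- what changed: A accumulates the last informative label while walking the zipped paths forward to the first mismatch; B first computes the common-prefix length with a while loop and then scans the shared prefix backwards, returning at the first informative name it meets.
import Mathlib
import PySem

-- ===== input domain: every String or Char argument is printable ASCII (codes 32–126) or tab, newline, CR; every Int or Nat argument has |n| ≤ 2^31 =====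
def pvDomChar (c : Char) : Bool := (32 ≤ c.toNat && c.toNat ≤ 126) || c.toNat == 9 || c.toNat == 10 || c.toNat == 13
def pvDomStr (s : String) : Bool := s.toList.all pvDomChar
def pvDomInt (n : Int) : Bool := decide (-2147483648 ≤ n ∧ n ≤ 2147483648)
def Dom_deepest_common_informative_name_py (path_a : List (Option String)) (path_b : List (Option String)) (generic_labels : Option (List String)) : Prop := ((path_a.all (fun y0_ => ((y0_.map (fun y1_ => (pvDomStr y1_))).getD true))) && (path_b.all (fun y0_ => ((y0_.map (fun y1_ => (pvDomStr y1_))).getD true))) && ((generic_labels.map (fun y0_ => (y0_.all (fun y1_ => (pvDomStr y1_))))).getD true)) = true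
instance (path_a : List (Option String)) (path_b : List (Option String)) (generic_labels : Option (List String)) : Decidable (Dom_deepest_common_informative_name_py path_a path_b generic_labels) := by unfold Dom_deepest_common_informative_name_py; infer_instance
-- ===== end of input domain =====

-- B replaces A's forward accumulate-last-informative scan by a common-prefix-length
-- computation followed by a backward first-informative search (alternative decomposition, same cost).


-- shared module-level context: BASE_GENERIC_LABELS and the two expressions both
-- Pythons share verbatim ('generic_labels or BASE_GENERIC_LABELS', 'name and name not in labels_to_skip')
def pvBaseGeneric : List String :=
  ["root", "cellular organisms", "Eukaryota", "Opisthokonta", "Metazoa",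
   "Eumetazoa", "Bilateria", "Protostomia", "Deuterostomia"]

def pvSkip (gl : Option (List String)) : List String :=
  match gl with
  | some l => if l.isEmpty then pvBaseGeneric else l
  | none => pvBaseGeneric

def pvInf (skip : List String) (name : Option String) : Bool :=
  match name with
  | some s => s ≠ "" && !skip.contains s
  | none => false

-- ===== PORT A =====
-- forward loop over the zipped paths, break on first mismatch, keep the LAST informative name
def pvALoop (skip : List String) : List (Option String × Option String) → Int → Option String × Int → Option String × Int
  | [], _, acc => acc
  | (na, nb) :: rest, depth, acc =>
    if na = nb then
      pvALoop skip rest (depth + 1) (if pvInf skip na then (na, depth) else acc)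
    else acc

def deepest_common_informative_name_py (path_a : List (Option String)) (path_b : List (Option String)) (generic_labels : Option (List String)) : Option String × Int :=
  pvALoop (pvSkip generic_labels) (path_a.zip path_b) 0 (none, -1)

-- ===== PORT B =====
-- common-prefix length (zip stops at the shorter list)
def pvCPL : List (Option String) → List (Option String) → Nat
  | a :: as_, b :: bs => if a = b then pvCPL as_ bs + 1 else 0
  | _, _ => 0

-- backward scan: FIRST informative name from the deep end of the shared prefix
def pvBScan (skip : List String) : List (Option String) → Int → Option String × Int
  | [], _ => (none, -1)
  | name :: rest, depth => if pvInf skip name then (name, depth) else pvBScan skip rest (depth - 1)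

def deepest_common_informative_name_py_alt (path_a : List (Option String)) (path_b : List (Option String)) (generic_labels : Option (List String)) : Option String × Int :=
  let skip := pvSkip generic_labels
  let k := pvCPL path_a path_b
  pvBScan skip ((path_a.take k).reverse) ((k : Int) - 1)

-- ===== PRECONDITION & SPEC =====
def Spec_deepest_common_informative_name_py (path_a : List (Option String)) (path_b : List (Option String)) (generic_labels : Option (List String)) (out : Option String × Int) : Prop := out = deepest_common_informative_name_py_alt path_a path_b generic_labels
instance (path_a : List (Option String)) (path_b : List (Option String)) (generic_labels : Option (List String)) (out : Option String × Int) : Decidable (Spec_deepest_common_informative_name_py path_a path_b generic_labels out) := by unfold Spec_deepest_common_informative_name_py; infer_instance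

-- ===== CLAIM (what is proved, stated in full; the proofs are below) =====
def Claim_equal_deepest_common_informative_name_py : Prop := ∀ (path_a : List (Option String)) (path_b : List (Option String)) (generic_labels : Option (List String)), Dom_deepest_common_informative_name_py path_a path_b generic_labels → Spec_deepest_common_informative_name_py path_a path_b generic_labels (deepest_common_informative_name_py path_a path_b generic_labels)

-- ===== LEMMAS AND PROOFS =====

-- the shared prefix of the two paths
def pvCP : List (Option String) → List (Option String) → List (Option String)
  | a :: as_, b :: bs => if a = b then a :: pvCP as_ bs else []
  | _, _ => []

theorem pvCP_length : ∀ (pa pb : List (Option String)), (pvCP pa pb).length = pvCPL pa pb := by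
  intro pa
  induction pa with
  | nil => intro pb; cases pb <;> simp [pvCP, pvCPL]
  | cons a as_ ih =>
    intro pb
    cases pb with
    | nil => simp [pvCP, pvCPL]
    | cons b bs =>
      by_cases h : a = b <;> simp [pvCP, pvCPL, h, ih]

theorem pvCP_take : ∀ (pa pb : List (Option String)), pa.take (pvCPL pa pb) = pvCP pa pb := by
  intro pa
  induction pa with
  | nil => intro pb; cases pb <;> simp [pvCP, pvCPL]
  | cons a as_ ih =>
    intro pb
    cases pb with
    | nil => simp [pvCP, pvCPL]
    | cons b bs =>
      by_cases h : a = b <;> simp [pvCP, pvCPL, h, ih]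

-- A's loop over the zipped paths only ever sees the shared prefix
def pvLLoop (skip : List String) : List (Option String) → Int → Option String × Int → Option String × Int
  | [], _, acc => acc
  | x :: xs, d, acc => pvLLoop skip xs (d + 1) (if pvInf skip x then (x, d) else acc)

theorem pvALoop_eq_LLoop (skip : List String) :
    ∀ (pa pb : List (Option String)) (d : Int) (acc : Option String × Int),
      pvALoop skip (pa.zip pb) d acc = pvLLoop skip (pvCP pa pb) d acc := by
  intro pa
  induction pa with
  | nil => intro pb d acc; cases pb <;> simp [pvCP, pvALoop, pvLLoop]
  | cons a as_ ih =>
    intro pb d acc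
    cases pb with
    | nil => simp [pvCP, pvALoop, pvLLoop]
    | cons b bs =>
      by_cases h : a = b
      · simp [pvCP, pvALoop, pvLLoop, h, ih]
      · simp [pvCP, pvALoop, pvLLoop, h]

theorem pvLLoop_append_singleton (skip : List String) :
    ∀ (xs : List (Option String)) (x : Option String) (d : Int) (acc : Option String × Int),
      pvLLoop skip (xs ++ [x]) d acc =
        if pvInf skip x then (x, d + xs.length) else pvLLoop skip xs d acc := by
  intro xs
  induction xs with
  | nil => intro x d acc; simp [pvLLoop]
  | cons y ys ih =>
    intro x d acc
    by_cases h : pvInf skip x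
    · simp only [List.cons_append, pvLLoop, ih, h, if_pos, List.length_cons]
      congr 1
      push_cast
      ring
    · simp [pvLLoop, ih, h]

-- keeping the last informative in a forward pass = taking the first informative in a backward pass
theorem pvLLoop_eq_BScan (skip : List String) (xs : List (Option String)) :
    pvLLoop skip xs 0 (none, -1) = pvBScan skip xs.reverse ((xs.length : Int) - 1) := by
  induction xs using List.reverseRecOn with
  | nil => simp [pvLLoop, pvBScan]
  | append_singleton ys x ih =>
    rw [pvLLoop_append_singleton]
    simp only [List.reverse_append, List.reverse_singleton, List.singleton_append,
      List.length_append, List.length_singleton, pvBScan]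
    have h1 : ((ys.length + 1 : Nat) : Int) - 1 = (ys.length : Int) := by push_cast; ring
    by_cases h : pvInf skip x
    · simp [h]
    · simp [h, h1, ih]

-- ===== VERDICT (by name: the statement is the Claim_ definition above) =====
theorem deepest_common_informative_name_py_spec : Claim_equal_deepest_common_informative_name_py := by
  intro pa pb gl _
  unfold Spec_deepest_common_informative_name_py
  unfold deepest_common_informative_name_py deepest_common_informative_name_py_alt
  rw [pvALoop_eq_LLoop, pvLLoop_eq_BScan, pvCP_length, ← pvCP_take pa pb]
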